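-- pv_equiv track=rewrite | github.com/adriano-uff/Lisp-like-python | Lisp-AbaixoMedia.py | maioresMedia
-- ===== SOURCE A (Python) =====
-- def car(x):
--     return x[0]
--
-- def cdr(x):
--     return x[1:]
--
-- def cons(x,y):
--     return [x] + y
--
-- def maioresMedia(val, media):
--     if val == []:
--         return []
--     else:
--         if car(val) < media:
--             return cons(car(val),maioresMedia(cdr(val), media))
--
--         else:
--             return maioresMedia(cdr(val), media)
-- ===== SOURCE B (Python) =====
-- def maioresMedia(val, media):
--     result = []
--     for x in val:
--         if x < media:
--             result.append(x)
--     return result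
-- ===== Notes on version B (the rewrite author's own statement) =====
-- stated objective: faster
-- what changed: Replaces the car/cdr/cons head-tail recursion (which re-slices the list and concatenates at every step) with a single iterative loop appending to an accumulator.
import Mathlib
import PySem

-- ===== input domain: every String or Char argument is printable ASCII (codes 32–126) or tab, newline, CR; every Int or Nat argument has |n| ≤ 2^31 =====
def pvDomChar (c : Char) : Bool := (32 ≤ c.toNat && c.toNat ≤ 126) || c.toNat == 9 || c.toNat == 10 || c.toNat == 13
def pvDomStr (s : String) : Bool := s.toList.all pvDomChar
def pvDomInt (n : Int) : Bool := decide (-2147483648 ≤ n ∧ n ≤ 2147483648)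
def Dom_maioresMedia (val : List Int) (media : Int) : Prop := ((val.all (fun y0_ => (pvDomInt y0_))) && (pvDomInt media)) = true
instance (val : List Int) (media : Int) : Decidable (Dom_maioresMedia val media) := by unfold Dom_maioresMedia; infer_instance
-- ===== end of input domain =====

-- B replaces A's car/cdr/cons recursion with an iterative accumulator loop (idiomatic).

-- ===== PORT A =====
def pvCar (x : List Int) : Int := x.headI   -- x[0]; inputs admitted are nonempty when called
def pvCdr (x : List Int) : List Int := PySem.List.slice x (some 1) none   -- x[1:]
def pvCons (x : Int) (y : List Int) : List Int := [x] ++ y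

def maioresMedia (val : List Int) (media : Int) : List Int :=
  if val = [] then []
  else
    if pvCar val < media then pvCons (pvCar val) (maioresMedia (pvCdr val) media)
    else maioresMedia (pvCdr val) media
termination_by val.length
decreasing_by
  all_goals
    simp [pvCdr, PySem.List.slice_from_one]
    cases val with
    | nil => simp_all
    | cons a t => simp

-- ===== PORT B =====
def maioresMedia_alt (val : List Int) (media : Int) : List Int :=
  val.foldl (fun result x => if x < media then result ++ [x] else result) []

-- ===== PRECONDITION & SPEC =====
def Spec_maioresMedia (val : List Int) (media : Int) (out : List Int) : Prop := out = maioresMedia_alt val media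
instance (val : List Int) (media : Int) (out : List Int) : Decidable (Spec_maioresMedia val media out) := by unfold Spec_maioresMedia; infer_instance

-- ===== CLAIM (what is proved, stated in full; the proofs are below) =====
def Claim_equal_maioresMedia : Prop := ∀ (val : List Int) (media : Int), Dom_maioresMedia val media → Spec_maioresMedia val media (maioresMedia val media)

-- ===== LEMMAS AND PROOFS =====

theorem maioresMedia_cons (a : Int) (t : List Int) (media : Int) :
    maioresMedia (a :: t) media =
      if a < media then a :: maioresMedia t media else maioresMedia t media := by
  rw [maioresMedia]
  simp [pvCar, pvCdr, pvCons, PySem.List.slice_from_one]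

theorem alt_acc (val : List Int) (media : Int) (acc : List Int) :
    val.foldl (fun result x => if x < media then result ++ [x] else result) acc =
      acc ++ val.foldl (fun result x => if x < media then result ++ [x] else result) [] := by
  induction val generalizing acc with
  | nil => simp
  | cons a t ih =>
    simp only [List.foldl]
    rw [ih, ih ((if a < media then [] ++ [a] else []))]
    by_cases h : a < media <;> simp [h]

theorem equal_all (val : List Int) (media : Int) :
    maioresMedia val media = maioresMedia_alt val media := by
  induction val with
  | nil => simp [maioresMedia, maioresMedia_alt]
  | cons a t ih =>
    rw [maioresMedia_cons, ih]
    unfold maioresMedia_alt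
    simp only [List.foldl]
    by_cases h : a < media
    · simp only [h, if_pos]
      rw [alt_acc t media ([] ++ [a])]
      simp
    · simp [h]

-- ===== VERDICT (by name: the statement is the Claim_ definition above) =====
theorem maioresMedia_spec : Claim_equal_maioresMedia := by
  intro val media _
  exact equal_all val media
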